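-- pv_equiv track=rewrite | github.com/jbvsmo/discoder | discoder/lib/helper.py | calculate_chunks
-- ===== SOURCE A (Python) =====
-- import itertools as it
--
-- def calculate_chunks(length, max_num, min_time):
--     """ Calculate the video chunks sizes in order to split a file in a
--         certain amount of small files depending on its length and maximum number
--         of transcoding boxes available.
--
--     :param length: The video length in seconds
--     :type length: int
--     :param max_num: The maximum amount of chunks that should be created.
--     :type max_num: int
--     :param min_time: The minimal amount of time/number of frames to create
--            a video chunk.
--     :type min_time: int
--     :return: list<tuple<int, 2>>
--     """
--     if length < max_num * min_time:
--         # min_time is limiting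
--         parts = length // min_time
--     else:
--         # max_num is limiting
--         parts = max_num
--
--     if parts:
--         size, extra = divmod(length, parts)
--     else:
--         size, extra = length, 0
--
--     # Add one extra second for each part until there's no more remainder.
--     extras = it.chain(it.repeat(1, extra), it.repeat(0))
--     i = 0
--     elements = []
--     while i < length:
--         e = next(extras)
--         elements.append((i, i + size + e))
--         i += size + e
--
--     # The last element has to be None to avoid cutting fractions of seconds.
--     elements[-1] = elements[-1][0], None
--     return elements
-- ===== SOURCE B (Python) =====
-- def calculate_chunks(length, max_num, min_time):
--     """Same chunk computation, but each interval is produced directly from its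
--     index by a closed formula instead of threading a running start/iterator."""
--     if length < max_num * min_time:
--         parts = length // min_time
--     else:
--         parts = max_num
--
--     if parts:
--         size, extra = divmod(length, parts)
--         n = min(parts, length)
--     else:
--         size, extra = length, 0
--         n = 1
--
--     elements = [(j * size + min(j, extra), (j + 1) * size + min(j + 1, extra))
--                 for j in range(n)]
--     elements[-1] = (elements[-1][0], None)
--     return elements
-- ===== Notes on version B (the rewrite author's own statement) =====
-- stated objective: alternative
-- what changed: Each (start,end) interval is computed directly from its index by a closed formula (j*size + min(j,extra)) over range(n), replacing A's running index threaded through an itertools chain of per-chunk extras.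
import Mathlib
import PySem

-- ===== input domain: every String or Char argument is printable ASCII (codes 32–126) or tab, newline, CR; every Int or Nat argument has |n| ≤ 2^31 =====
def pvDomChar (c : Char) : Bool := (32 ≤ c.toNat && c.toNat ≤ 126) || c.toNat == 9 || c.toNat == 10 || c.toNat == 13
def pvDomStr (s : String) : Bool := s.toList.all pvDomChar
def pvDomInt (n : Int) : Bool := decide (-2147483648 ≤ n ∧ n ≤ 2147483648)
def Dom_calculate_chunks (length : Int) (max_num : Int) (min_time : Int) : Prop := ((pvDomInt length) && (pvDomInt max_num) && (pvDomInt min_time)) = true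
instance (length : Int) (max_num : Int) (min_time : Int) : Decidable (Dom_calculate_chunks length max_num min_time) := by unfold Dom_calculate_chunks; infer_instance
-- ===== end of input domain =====

-- B computes each interval directly from its index by a closed formula instead of A's
-- running index fed by an itertools chain; equal cost, different decomposition.

-- ===== PORT A =====
-- the final 'elements[-1] = elements[-1][0], None' line shared verbatim by both Pythons
-- (on [] Python raises IndexError; Pre_ excludes that, the [] result here is never claimed)
def pyLastNone (xs : List (Int × Option Int)) : List (Int × Option Int) :=
  match xs.getLast? with
  | none => []
  | some p => xs.dropLast ++ [(p.1, none)]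

-- the 'while i < length' loop; 'next(extras)' yields 1 while the repeat(1, extra) prefix
-- lasts (extra counts down), then 0.  fuel bounds the iterations (≥ length suffices on Pre_).
def chunkA_loop (length size : Int) (fuel : Nat) (i extra : Int)
    (acc : List (Int × Option Int)) : List (Int × Option Int) :=
  match fuel with
  | 0 => acc
  | Nat.succ f =>
    if i < length then
      let e : Int := if 0 < extra then 1 else 0
      chunkA_loop length size f (i + size + e) (extra - e) (acc ++ [(i, some (i + size + e))])
    else acc

def calculate_chunks (length : Int) (max_num : Int) (min_time : Int) : List (Int × Option Int) :=
  let parts : Int :=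
    if length < max_num * min_time then PySem.Int.floordiv length min_time else max_num
  let se : Int × Int :=
    if parts ≠ 0 then (PySem.Int.floordiv length parts, PySem.Int.mod length parts)
    else (length, 0)
  pyLastNone (chunkA_loop length se.1 length.toNat 0 se.2 [])

-- ===== PORT B =====
def chunkB_elem (size extra : Int) (j : Nat) : Int × Option Int :=
  ((j : Int) * size + min (j : Int) extra,
   some (((j : Int) + 1) * size + min ((j : Int) + 1) extra))

def calculate_chunks_alt (length : Int) (max_num : Int) (min_time : Int) : List (Int × Option Int) :=
  let parts : Int :=
    if length < max_num * min_time then PySem.Int.floordiv length min_time else max_num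
  let sen : Int × Int × Int :=
    if parts ≠ 0 then (PySem.Int.floordiv length parts, PySem.Int.mod length parts, min parts length)
    else (length, 0, 1)
  pyLastNone ((List.range sen.2.2.toNat).map (chunkB_elem sen.1 sen.2.1))

-- ===== PRECONDITION & SPEC =====
-- Pre_ holds exactly where the Python A returns: length ≤ 0 gives an empty list and
-- IndexError; a negative parts (negative min_time in the first branch, negative max_num
-- in the second) makes the while loop diverge; min_time = 0 in the first branch is a
-- ZeroDivisionError.
def Pre_calculate_chunks (length : Int) (max_num : Int) (min_time : Int) : Prop :=
  1 ≤ length ∧ (if length < max_num * min_time then 1 ≤ min_time else 0 ≤ max_num)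
instance (length : Int) (max_num : Int) (min_time : Int) : Decidable (Pre_calculate_chunks length max_num min_time) := by unfold Pre_calculate_chunks; infer_instance

def pvWitness_calculate_chunks : Int × Int × Int := (10, 3, 2)

def Spec_calculate_chunks (length : Int) (max_num : Int) (min_time : Int) (out : List (Int × Option Int)) : Prop := out = calculate_chunks_alt length max_num min_time
instance (length : Int) (max_num : Int) (min_time : Int) (out : List (Int × Option Int)) : Decidable (Spec_calculate_chunks length max_num min_time out) := by unfold Spec_calculate_chunks; infer_instance

-- ===== CLAIM (what is proved, stated in full; the proofs are below) =====
def Claim_equal_calculate_chunks : Prop := ∀ (length : Int) (max_num : Int) (min_time : Int), Dom_calculate_chunks length max_num min_time → Pre_calculate_chunks length max_num min_time → Spec_calculate_chunks length max_num min_time (calculate_chunks length max_num min_time)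

-- ===== LEMMAS AND PROOFS =====

/-- The loop, started at the state reached after `j` steps, appends exactly the
closed-form elements for indices `j, …, N-1`. -/
lemma loop_eq (length size extra : Int) (N : Nat)
    (hiff : ∀ j : Nat, ((j : Int) * size + min (j : Int) extra < length ↔ j < N)) :
    ∀ (k j fuel : Nat) (acc : List (Int × Option Int)), j + k = N → k ≤ fuel →
      chunkA_loop length size fuel ((j : Int) * size + min (j : Int) extra)
          (extra - min (j : Int) extra) acc
        = acc ++ (List.range' j k).map (chunkB_elem size extra) := by
  intro k
  induction k with
  | zero =>
    intro j fuel acc hjk hf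
    have hnot : ¬ ((j : Int) * size + min (j : Int) extra < length) := by
      rw [hiff]; omega
    cases fuel with
    | zero => simp [chunkA_loop]
    | succ f => simp [chunkA_loop, hnot]
  | succ k ih =>
    intro j fuel acc hjk hf
    obtain ⟨f, rfl⟩ : ∃ f, fuel = f + 1 := ⟨fuel - 1, by omega⟩
    have hlt : (j : Int) * size + min (j : Int) extra < length := by
      rw [hiff]; omega
    have hmul : ((j : Int) + 1) * size = (j : Int) * size + size := by ring
    have hcast : (((j + 1 : Nat)) : Int) = (j : Int) + 1 := by push_cast; ring
    have hstep :
        (j : Int) * size + min (j : Int) extra + size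
            + (if 0 < extra - min (j : Int) extra then (1 : Int) else 0)
          = ((j : Int) + 1) * size + min ((j : Int) + 1) extra := by
      by_cases hje : (j : Int) < extra
      · rw [if_pos (by omega)]; omega
      · rw [if_neg (by omega)]; omega
    have hexstep :
        extra - min (j : Int) extra - (if 0 < extra - min (j : Int) extra then (1 : Int) else 0)
          = extra - min ((j : Int) + 1) extra := by
      by_cases hje : (j : Int) < extra
      · rw [if_pos (by omega)]; omega
      · rw [if_neg (by omega)]; omega
    show chunkA_loop length size (f + 1) _ _ _ = _
    rw [chunkA_loop, if_pos hlt]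
    have := ih (j + 1) f
      (acc ++ [((j : Int) * size + min (j : Int) extra,
        some (((j : Int) + 1) * size + min ((j : Int) + 1) extra))])
      (by omega) (by omega)
    rw [hcast] at this
    simp only [hstep, hexstep, this, List.range'_succ, List.map_cons, List.append_assoc,
      List.singleton_append, chunkB_elem]

/-- Apply `loop_eq` from the initial state. -/
lemma loop_eq_zero (length size extra : Int) (N fuel : Nat) (hex : 0 ≤ extra)
    (hiff : ∀ j : Nat, ((j : Int) * size + min (j : Int) extra < length ↔ j < N))
    (hf : N ≤ fuel) :
    chunkA_loop length size fuel 0 extra []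
      = (List.range N).map (chunkB_elem size extra) := by
  have h := loop_eq length size extra N hiff N 0 fuel [] (by omega) hf
  have h0 : ((0 : Nat) : Int) * size + min ((0 : Nat) : Int) extra = 0 := by
    simp; omega
  have h1 : extra - min ((0 : Nat) : Int) extra = extra := by
    simp; omega
  rw [h0, h1] at h
  rw [h, List.range_eq_range', List.nil_append]

-- ===== VERDICT (by name: the statement is the Claim_ definition above) =====
theorem calculate_chunks_spec : Claim_equal_calculate_chunks := by
  intro length max_num min_time hdom hpre
  obtain ⟨hl, hbr⟩ := hpre
  unfold Spec_calculate_chunks calculate_chunks calculate_chunks_alt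
  set parts : Int :=
    if length < max_num * min_time then PySem.Int.floordiv length min_time else max_num
    with hparts
  have hp0 : 0 ≤ parts := by
    rw [hparts]
    split_ifs with h
    · rw [if_pos h] at hbr
      rw [PySem.Int.floordiv_eq_ediv_of_pos (by omega)]
      exact Int.ediv_nonneg (by omega) (by omega)
    · rw [if_neg h] at hbr; exact hbr
  by_cases hpz : parts = 0
  · -- parts = 0: one chunk (0, length)
    simp only [hpz, ne_eq, not_true_eq_false, if_false]
    have hiff : ∀ j : Nat, ((j : Int) * length + min (j : Int) (0 : Int) < length ↔ j < 1) := by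
      intro j
      have hmin : min ((j : Int)) (0 : Int) = 0 := by omega
      rw [hmin]
      constructor
      · intro h
        by_contra hc
        have h1 : (1 : Int) ≤ (j : Int) := by omega
        have := mul_le_mul_of_nonneg_right h1 (show (0:Int) ≤ length by omega)
        omega
      · intro h
        have hj : j = 0 := by omega
        subst hj; simpa using hl
    rw [loop_eq_zero length length 0 1 length.toNat le_rfl hiff (by omega)]
    norm_num
  · -- parts ≥ 1
    have hp1 : 1 ≤ parts := by omega
    simp only [ne_eq, hpz, not_false_eq_true, if_true]
    set size : Int := PySem.Int.floordiv length parts with hsize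
    set extra : Int := PySem.Int.mod length parts with hextra
    have hse : size = length / parts := by
      rw [hsize, PySem.Int.floordiv_eq_ediv_of_pos (by omega)]
    have hee : extra = length % parts := by
      rw [hextra, PySem.Int.mod_eq_emod_of_pos (by omega)]
    have hex : 0 ≤ extra := by rw [hee]; exact Int.emod_nonneg _ (by omega)
    have hexlt : extra < parts := by rw [hee]; exact Int.emod_lt_of_pos _ (by omega)
    have hsum : parts * size + extra = length := by
      rw [hse, hee]; exact Int.mul_ediv_add_emod length parts
    have hs0 : 0 ≤ size := by rw [hse]; exact Int.ediv_nonneg (by omega) (by omega)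
    have hNle : min parts length ≤ length := min_le_right _ _
    have hN1 : 1 ≤ min parts length := le_min hp1 hl
    have hNcast : (((min parts length).toNat : Int)) = min parts length := by omega
    have hiff : ∀ j : Nat,
        ((j : Int) * size + min (j : Int) extra < length ↔ j < (min parts length).toNat) := by
      intro j
      by_cases hsz : size = 0
      · -- size = 0 ⇒ length = extra, min parts length = length
        have hle : length = extra := by rw [← hsum, hsz]; ring
        have hmn : min parts length = length := by omega
        have hminj : min (j : Int) extra = min (j : Int) length := by omega
        constructor
        · intro h; rw [hsz] at h; simp at h
          have : (j : Int) < length := by omega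
          omega
        · intro h
          have hj : (j : Int) < length := by omega
          rw [hsz]; simp; omega
      · -- size ≥ 1 ⇒ parts ≤ length, min = parts
        have hs1 : 1 ≤ size := by omega
        have hple : parts ≤ length := by
          have := mul_le_mul_of_nonneg_left hs1 (show (0:Int) ≤ parts by omega)
          omega
        have hmn : min parts length = parts := by omega
        constructor
        · intro h
          by_contra hc
          have hjp : parts ≤ (j : Int) := by omega
          have h1 : parts * size ≤ (j : Int) * size := mul_le_mul_of_nonneg_right hjp hs0
          have h2 : min (j : Int) extra = extra := by omega
          omega
        · intro h
          have hjp : (j : Int) ≤ parts - 1 := by omega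
          have h1 : (j : Int) * size ≤ (parts - 1) * size := mul_le_mul_of_nonneg_right hjp hs0
          have h2 : (parts - 1) * size = parts * size - size := by ring
          have h3 : min (j : Int) extra ≤ extra := min_le_right _ _
          omega
    rw [loop_eq_zero length size extra (min parts length).toNat length.toNat hex hiff (by omega)]
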